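-- pv_equiv track=rewrite | github.com/ydh4481/code_test | 백준/Silver/3085. 사탕 게임/사탕 게임.py | count_line
-- ===== SOURCE A (Python) =====
-- def count_line(line):
--     result = [1]
--     m = 1
--     for i in range(0, len(line) - 1):
--         if line[i] == line[i + 1]:
--             m += 1
--         else:
--             m = 1
--         result.append(m)
--     return max(result)
-- ===== SOURCE B (Python) =====
-- def count_line(line):
--     # Staged: compute the break positions (boundaries between maximal runs),
--     # then the answer is the largest gap between consecutive boundaries.
--     cuts = [i + 1 for i, (a, b) in enumerate(zip(line, line[1:])) if a != b]
--     bounds = [0] + cuts + [len(line)]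
--     best = max(b - a for a, b in zip(bounds, bounds[1:]))
--     return max(best, 1)
-- ===== Notes on version B (the rewrite author's own statement) =====
-- stated objective: alternative
-- what changed: A keeps a running counter during one scan and appends every prefix count to a list before taking its max; B never counts runs at all: it collects the break positions between adjacent unequal elements, forms the boundary list [0]+cuts+[n], and returns the largest difference of consecutive boundaries (clamped to 1).
import Mathlib
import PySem

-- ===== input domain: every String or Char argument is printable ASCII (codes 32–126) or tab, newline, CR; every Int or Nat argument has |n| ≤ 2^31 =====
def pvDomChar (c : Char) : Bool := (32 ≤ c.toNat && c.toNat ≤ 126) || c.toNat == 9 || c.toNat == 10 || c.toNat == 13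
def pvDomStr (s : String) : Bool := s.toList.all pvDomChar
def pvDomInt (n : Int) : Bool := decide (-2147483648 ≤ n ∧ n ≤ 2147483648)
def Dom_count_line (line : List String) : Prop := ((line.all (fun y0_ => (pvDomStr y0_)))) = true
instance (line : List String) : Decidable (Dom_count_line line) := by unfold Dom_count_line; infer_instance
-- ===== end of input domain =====

-- B replaces A's running-counter scan (prefix-count list, then max) with a staged
-- boundary computation: collect the break positions between adjacent unequal elements,
-- then return the largest gap between consecutive boundaries; alternative decomposition, same cost.

-- ===== PORT A =====
-- Literal port of A: result=[1]; m=1; for i in range(0, len(line)-1): update m, append; return max(result).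
def count_line (line : List String) : Int :=
  let st := (PySem.List.pyRange 0 ((line.length : Int) - 1) 1).foldl
    (fun (st : List Int × Int) i =>
      let m : Int :=
        if PySem.List.pyGetD line i "" == PySem.List.pyGetD line (i + 1) "" then st.2 + 1 else 1
      (st.1 ++ [m], m))
    ([1], 1)
  (PySem.List.max? st.1 (fun x => x)).getD 0

-- ===== PORT B =====
-- cuts = [i+1 for i,(a,b) in enumerate(zip(line, line[1:])) if a != b];
-- bounds = [0] + cuts + [len(line)]; best = max(b-a over adjacent bounds); return max(best, 1).
-- (Python's max over the gap generator never sees an empty sequence — bounds has ≥ 2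
-- elements — so the total .getD 0 port of max is exact here.)
def count_line_alt (line : List String) : Int :=
  let cuts := (PySem.List.enumerate (line.zip (PySem.List.slice line (some 1) none)) 0).filterMap
      (fun ip => if ip.2.1 == ip.2.2 then none else some (ip.1 + 1))
  let bounds := [(0 : Int)] ++ cuts ++ [(line.length : Int)]
  let best := (PySem.List.max?
      ((bounds.zip (PySem.List.slice bounds (some 1) none)).map (fun p => p.2 - p.1))
      (fun x => x)).getD 0
  max best 1

-- ===== PRECONDITION & SPEC =====
def Spec_count_line (line : List String) (out : Int) : Prop := out = count_line_alt line
instance (line : List String) (out : Int) : Decidable (Spec_count_line line out) := by unfold Spec_count_line; infer_instance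

-- ===== CLAIM (what is proved, stated in full; the proofs are below) =====
def Claim_equal_count_line : Prop := ∀ (line : List String), Dom_count_line line → Spec_count_line line (count_line line)

-- ===== LEMMAS AND PROOFS =====

-- run lengths of the maximal runs of equal elements (common reference point of both proofs)
def pvRunLengths : List String → List Int
  | [] => []
  | x :: xs =>
    (((xs.takeWhile (fun y => y == x)).length : Int) + 1) ::
      pvRunLengths (xs.dropWhile (fun y => y == x))
termination_by l => l.length
decreasing_by
  simp only [List.length_cons]
  have := List.length_dropWhile_le (fun y => y == x) xs
  omega

-- the successive values taken by A's counter m across the adjacent pairs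
def pvMs : List (String × String) → Int → List Int
  | [], _ => []
  | p :: ps, m =>
    let m' : Int := if p.1 == p.2 then m + 1 else 1
    m' :: pvMs ps m'

-- break positions: for each adjacent unequal pair at offset o, record o+1
def pvCuts : List String → Int → List Int
  | [], _ => []
  | [_], _ => []
  | a :: b :: r, o => if a == b then pvCuts (b :: r) (o + 1) else (o + 1) :: pvCuts (b :: r) (o + 1)

-- consecutive differences of a list
def pvDiffs : List Int → List Int
  | a :: b :: l => (b - a) :: pvDiffs (b :: l)
  | _ => []

-- an index loop over adjacent positions is a fold over the zip with the tail
lemma pv_range_to_zip {σ : Type} (F : σ → String → String → σ) :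
    ∀ (l : List String) (st : σ),
      (List.range (l.length - 1)).foldl
          (fun st k => F st (l.getD k "") (l.getD (k + 1) "")) st
        = (l.zip l.tail).foldl (fun st p => F st p.1 p.2) st := by
  intro l
  induction l with
  | nil => intro st; simp
  | cons x xs ih =>
    cases xs with
    | nil => intro st; simp
    | cons y ys =>
      intro st
      have hlen : (x :: y :: ys : List String).length - 1 = ys.length + 1 := by simp
      rw [hlen, List.range_succ_eq_map]
      simp only [List.foldl_cons, List.foldl_map, List.getD_cons_zero, List.getD_cons_succ,
        List.zip_cons_cons, List.tail_cons]
      have h2 : (y :: ys : List String).length - 1 = ys.length := by simp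
      have := ih (F st x y)
      rw [h2] at this
      simpa using this

-- A's fold only appends the successive m values to result
lemma pv_fold_fst :
    ∀ (ps : List (String × String)) (res : List Int) (m : Int),
      (ps.foldl
          (fun (st : List Int × Int) (p : String × String) =>
            (st.1 ++ [if p.1 == p.2 then st.2 + 1 else 1],
             if p.1 == p.2 then st.2 + 1 else 1))
          (res, m)).1 = res ++ pvMs ps m := by
  intro ps
  induction ps with
  | nil => intro res m; simp [pvMs]
  | cons p ps ih =>
    intro res m
    simp only [List.foldl_cons, pvMs]
    rw [ih]
    simp

-- A-side key lemma: the running max over A's m-values equals the running max over run lengths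
lemma pv_key :
    ∀ (xs : List String) (cur : String) (cnt acc : Int),
      1 ≤ cnt → cnt ≤ acc →
      (pvMs ((cur :: xs).zip xs) cnt).foldl max acc
        = ((cnt + ((xs.takeWhile (fun y => y == cur)).length : Int)) ::
            pvRunLengths (xs.dropWhile (fun y => y == cur))).foldl max acc := by
  intro xs
  induction xs with
  | nil =>
    intro cur cnt acc h1 h2
    simp [pvMs, pvRunLengths]
    omega
  | cons y ys ih =>
    intro cur cnt acc h1 h2
    by_cases hbe : (y == cur) = true
    · have hc : cur = y := (eq_of_beq hbe).symm
      subst hc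
      simp only [List.zip_cons_cons, pvMs, beq_self_eq_true, if_pos, List.takeWhile_cons,
        List.dropWhile_cons, List.foldl_cons, List.length_cons]
      rw [ih cur (cnt + 1) (max acc (cnt + 1)) (by omega) (le_max_right _ _)]
      simp only [List.foldl_cons]
      congr 1
      push_cast
      omega
    · have hbe' : (y == cur) = false := by simpa using hbe
      have hcf : (cur == y) = false := by
        rw [beq_eq_false_iff_ne]
        intro h
        exact absurd (by simp [h]) hbe
      simp only [List.zip_cons_cons, pvMs, hbe', hcf, if_neg, Bool.false_eq_true, not_false_iff,
        List.takeWhile_cons, List.dropWhile_cons, List.foldl_cons, List.length_nil]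
      rw [ih y 1 (max acc 1) (by omega) (le_max_right _ _)]
      have hacc1 : max acc 1 = acc := by omega
      have hacc : max acc (cnt + ((0 : Nat) : Int)) = acc := by
        simp only [Nat.cast_zero, add_zero]
        omega
      rw [hacc1, hacc]
      simp only [pvRunLengths, List.foldl_cons]
      congr 1
      omega

-- A reduced to the running max of the run lengths
lemma pv_A_runs (line : List String) :
    count_line line = (pvRunLengths line).foldl max 1 := by
  cases line with
  | nil =>
    simp [count_line, pvRunLengths, PySem.List.max?_id_cons]
  | cons x xs =>
    have hA : count_line (x :: xs)
        = (pvMs ((x :: xs).zip xs) 1).foldl max 1 := by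
      have hrange : PySem.List.pyRange 0 (((x :: xs).length : Int) - 1) 1
          = (List.range xs.length).map (fun (k : Nat) => (k : Int)) := by
        rw [PySem.List.pyRange_one]
        have hb : ((((x :: xs).length : Int)) - 1 - 0).toNat = xs.length := by
          simp only [List.length_cons]
          omega
        rw [hb]
        simp only [zero_add]
      simp only [count_line]
      rw [hrange, List.foldl_map]
      simp only [← Nat.cast_add_one, PySem.List.pyGetD_natCast]
      have hz := pv_range_to_zip (fun (st : List Int × Int) a b =>
          (st.1 ++ [if a == b then st.2 + 1 else 1], if a == b then st.2 + 1 else 1)) (x :: xs)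
      simp only [List.length_cons, Nat.add_sub_cancel] at hz
      rw [hz ([1], 1), List.tail_cons, pv_fold_fst]
      rw [List.singleton_append, PySem.List.max?_id_cons]
      simp
    rw [hA, pv_key xs x 1 1 le_rfl le_rfl]
    simp only [pvRunLengths, List.foldl_cons]
    congr 1
    omega

-- B's comprehension over enumerate(zip(line, line[1:])) computes pvCuts
lemma pv_cuts_gen :
    ∀ (l : List String) (s : Int),
      (PySem.List.enumerate (l.zip l.tail) s).filterMap
          (fun ip => if ip.2.1 == ip.2.2 then none else some (ip.1 + 1))
        = pvCuts l s := by
  intro l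
  induction l with
  | nil => intro s; simp [pvCuts, PySem.List.enumerate_nil]
  | cons a t ih =>
    cases t with
    | nil => intro s; simp [pvCuts, PySem.List.enumerate_nil]
    | cons b r =>
      intro s
      simp only [List.zip_cons_cons, List.tail_cons, PySem.List.enumerate_cons,
        List.filterMap_cons, pvCuts]
      simp only [List.tail_cons] at ih
      rw [ih (s + 1)]
      by_cases h : (a == b) = true
      · simp [h]
      · simp [h]

-- adjacent-pair differences via zip-with-tail are pvDiffs
lemma pv_diffs_zip :
    ∀ (l : List Int), (l.zip l.tail).map (fun p => p.2 - p.1) = pvDiffs l := by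
  intro l
  induction l with
  | nil => simp [pvDiffs]
  | cons a t ih =>
    cases t with
    | nil => simp [pvDiffs]
    | cons b r =>
      simp only [List.zip_cons_cons, List.tail_cons, List.map_cons, pvDiffs]
      simpa using ih

-- B-side key lemma: consecutive differences of the boundary list are the run lengths
lemma pv_diffs_cuts :
    ∀ (xs : List String) (x : String) (s o : Int),
      pvDiffs (s :: (pvCuts (x :: xs) o ++ [o + 1 + (xs.length : Int)]))
        = (o + 1 - s + ((xs.takeWhile (fun y => y == x)).length : Int)) ::
            pvRunLengths (xs.dropWhile (fun y => y == x)) := by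
  intro xs
  induction xs with
  | nil =>
    intro x s o
    simp [pvCuts, pvDiffs, pvRunLengths]
  | cons y ys ih =>
    intro x s o
    by_cases h : (x == y) = true
    · have hx : x = y := eq_of_beq h
      subst hx
      simp only [pvCuts, List.length_cons, List.takeWhile_cons, beq_self_eq_true,
        List.dropWhile_cons, if_pos]
      have := ih x s (o + 1)
      have harg : o + 1 + ((ys.length + 1 : Nat) : Int) = (o + 1) + 1 + (ys.length : Int) := by
        push_cast; ring
      rw [harg, this]
      congr 1
      push_cast
      ring
    · have hyx : (y == x) = false := by
        rw [beq_eq_false_iff_ne]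
        intro hh
        exact absurd (by simp [hh]) h
      simp only [pvCuts, if_neg h, List.takeWhile_cons, hyx, List.dropWhile_cons,
        Bool.false_eq_true, if_neg, not_false_iff, List.length_nil, List.cons_append]
      show pvDiffs (s :: (o+1) :: (pvCuts (y :: ys) (o+1) ++ [o + 1 + ((ys.length + 1 : Nat) : Int)]))
          = _
      have harg : o + 1 + ((ys.length + 1 : Nat) : Int) = (o + 1) + 1 + (ys.length : Int) := by
        push_cast; ring
      rw [harg]
      have hD : pvDiffs (s :: (o+1) :: (pvCuts (y :: ys) (o+1) ++ [(o+1) + 1 + (ys.length : Int)]))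
          = ((o+1) - s) :: pvDiffs ((o+1) :: (pvCuts (y :: ys) (o+1) ++ [(o+1) + 1 + (ys.length : Int)])) := by
        cases hc : pvCuts (y :: ys) (o+1) with
        | nil => simp [pvDiffs]
        | cons c cs => simp [pvDiffs]
      rw [hD, ih y (o+1) (o+1)]
      simp only [pvRunLengths]
      congr 1
      · ring_nf
      · congr 1
        ring

-- pulling an extra element into the init of a running max
lemma pv_foldl_max_init :
    ∀ (l : List Int) (a b : Int), l.foldl max (max a b) = max a (l.foldl max b) := by
  intro l
  induction l with
  | nil => intro a b; rfl
  | cons c cs ih =>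
    intro a b
    simp only [List.foldl_cons, max_assoc]
    exact ih a (max b c)

-- B reduced to the running max of the run lengths
lemma pv_B_runs (line : List String) :
    count_line_alt line = (pvRunLengths line).foldl max 1 := by
  cases line with
  | nil =>
    simp [count_line_alt, pvRunLengths, PySem.List.slice_from_one, PySem.List.enumerate_nil,
      PySem.List.max?_id_cons]
  | cons x xs =>
    simp only [count_line_alt, PySem.List.slice_from_one, List.tail_cons]
    have hc := pv_cuts_gen (x :: xs) 0
    simp only [List.tail_cons] at hc
    rw [hc]
    rw [pv_diffs_zip]
    have hlen : (((x :: xs).length : Nat) : Int) = 0 + 1 + (xs.length : Int) := by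
      simp; ring
    rw [List.singleton_append, List.cons_append, hlen, pv_diffs_cuts xs x 0 0]
    rw [PySem.List.max?_id_cons]
    simp only [Option.getD_some]
    have hr : pvRunLengths (x :: xs)
        = (((xs.takeWhile (fun y => y == x)).length : Int) + 1) ::
            pvRunLengths (xs.dropWhile (fun y => y == x)) := by
      simp [pvRunLengths]
    rw [hr]
    simp only [List.foldl_cons]
    have h1 : max (1 : Int) (((xs.takeWhile (fun y => y == x)).length : Int) + 1)
        = 0 + 1 - 0 + ((xs.takeWhile (fun y => y == x)).length : Int) := by
      have : (0 : Int) ≤ ((xs.takeWhile (fun y => y == x)).length : Int) := by positivity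
      omega
    rw [← h1, pv_foldl_max_init, max_comm]
    omega

-- ===== VERDICT (by name: the statement is the Claim_ definition above) =====
theorem count_line_spec : Claim_equal_count_line := by
  intro line _hdom
  unfold Spec_count_line
  rw [pv_A_runs, pv_B_runs]
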